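-- pv_equiv track=rewrite | github.com/jesus-333/advent_of_code | 2024/9_Disk_fragmenter_part_2.py | get_empty_space_list
-- ===== SOURCE A (Python) =====
-- def get_empty_space_list(disk_map_extended) :
--     map_empty_space_position = []
--     map_empty_space_size = []
--
--     gap_found = False
--     gap_size = 0
--     for i in range(len(disk_map_extended)) :
--         if disk_map_extended[i] == -1 :
--             # Save only the initial position of the gap
--             if not gap_found : map_empty_space_position.append(i)
--
--             # Start to measure  the gap size
--             gap_found = True
--             gap_size += 1
--         else :
--             # In this case the current block is a file
--             # But if gap_found is True it means that the previous block was the last of an empy gap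
--             # So I save the gap size
--             if gap_found :
--                 gap_found = False
--                 map_empty_space_size.append(gap_size)
--                 gap_size = 0
--
--     # If the cycle end and gap found is still True it means that all the last part of the disk is empty
--     if gap_found : map_empty_space_size.append(gap_size)
--
--     return map_empty_space_position, map_empty_space_size
-- ===== SOURCE B (Python) =====
-- def get_empty_space_list(disk_map_extended):
--     map_empty_space_position = []
--     map_empty_space_size = []
--     i = 0
--     n = len(disk_map_extended)
--     while i < n:
--         # scan the whole run of equal values starting at i
--         j = i + 1
--         while j < n and disk_map_extended[j] == disk_map_extended[i]:
--             j += 1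
--         if disk_map_extended[i] == -1:
--             map_empty_space_position.append(i)
--             map_empty_space_size.append(j - i)
--         i = j
--     return map_empty_space_position, map_empty_space_size
-- ===== Notes on version B (the rewrite author's own statement) =====
-- stated objective: alternative
-- what changed: Replaces A's per-element gap_found/gap_size state machine (with a trailing-gap fixup after the loop) by a run-based two-pointer scan: an inner loop finds the end of each run of equal values, and a gap's position and size are recorded together in one step, needing no final special case.
import Mathlib
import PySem

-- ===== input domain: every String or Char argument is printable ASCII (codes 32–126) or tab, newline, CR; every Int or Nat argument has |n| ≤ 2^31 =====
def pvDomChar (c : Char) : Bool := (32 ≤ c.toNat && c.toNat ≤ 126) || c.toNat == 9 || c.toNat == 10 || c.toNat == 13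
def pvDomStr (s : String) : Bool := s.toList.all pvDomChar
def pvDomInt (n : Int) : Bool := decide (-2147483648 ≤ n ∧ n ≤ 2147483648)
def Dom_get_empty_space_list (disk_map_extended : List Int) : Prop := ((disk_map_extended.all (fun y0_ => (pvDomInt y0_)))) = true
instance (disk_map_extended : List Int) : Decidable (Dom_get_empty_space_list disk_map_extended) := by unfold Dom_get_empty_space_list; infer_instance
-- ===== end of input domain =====

-- B replaces A's per-element gap_found/gap_size state machine (with its trailing-gap
-- fixup after the loop) by a run-based two-pointer scan; equivalence is proved on all inputs.

-- ===== PORT A =====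
-- literal port of A: for i in range(len(d)) over state (pos, siz, gap_found, gap_size),
-- then the trailing-gap fixup.
def get_empty_space_list (disk_map_extended : List Int) : List Int × List Int :=
  let r := (PySem.List.pyRange 0 (PySem.List.len disk_map_extended) 1).foldl
    (fun (st : List Int × List Int × Bool × Int) i =>
      if PySem.List.pyGetD disk_map_extended i 0 = -1 then
        ((if st.2.2.1 then st.1 else st.1 ++ [i]), st.2.1, true, st.2.2.2 + 1)
      else if st.2.2.1 then (st.1, st.2.1 ++ [st.2.2.2], false, 0)
      else st)
    ([], [], false, 0)
  (r.1, if r.2.2.1 then r.2.1 ++ [r.2.2.2] else r.2.1)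

-- ===== PORT B =====
-- inner while loop of Source B: number of further elements equal to v at the head of the list
def runLen (v : Int) : List Int → Nat
  | [] => 0
  | y :: ys => if y = v then runLen v ys + 1 else 0

-- outer while loop of Source B: the unprocessed suffix stands for the indices i..n-1
def altGo : List Int → Int → List Int → List Int → List Int × List Int
  | [], _, pos, siz => (pos, siz)
  | x :: xs, i, pos, siz =>
    let k := runLen x xs
    if x = -1 then
      altGo (xs.drop k) (i + ((k : Int) + 1)) (pos ++ [i]) (siz ++ [(k : Int) + 1])
    else
      altGo (xs.drop k) (i + ((k : Int) + 1)) pos siz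
termination_by l _ _ _ => l.length
decreasing_by
  all_goals
    have h := List.length_drop (l := xs) (i := runLen x xs)
    simp only [List.length_cons]
    omega

def get_empty_space_list_alt (disk_map_extended : List Int) : List Int × List Int :=
  altGo disk_map_extended 0 [] []

-- ===== PRECONDITION & SPEC =====
def Spec_get_empty_space_list (disk_map_extended : List Int) (out : List Int × List Int) : Prop := out = get_empty_space_list_alt disk_map_extended
instance (disk_map_extended : List Int) (out : List Int × List Int) : Decidable (Spec_get_empty_space_list disk_map_extended out) := by unfold Spec_get_empty_space_list; infer_instance

-- ===== CLAIM (what is proved, stated in full; the proofs are below) =====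
def Claim_equal_get_empty_space_list : Prop := ∀ (disk_map_extended : List Int), Dom_get_empty_space_list disk_map_extended → Spec_get_empty_space_list disk_map_extended (get_empty_space_list disk_map_extended)

-- ===== LEMMAS AND PROOFS =====

-- A's loop body, as a function of the pair (index, value)
def gstep (st : List Int × List Int × Bool × Int) (p : Int × Int) : List Int × List Int × Bool × Int :=
  if p.2 = -1 then ((if st.2.2.1 then st.1 else st.1 ++ [p.1]), st.2.1, true, st.2.2.2 + 1)
  else if st.2.2.1 then (st.1, st.2.1 ++ [st.2.2.2], false, 0)
  else st

-- A's post-loop fixup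
def gfin (st : List Int × List Int × Bool × Int) : List Int × List Int :=
  (st.1, if st.2.2.1 then st.2.1 ++ [st.2.2.2] else st.2.1)

theorem bridgeA (d : List Int) :
    get_empty_space_list d = gfin ((PySem.List.enumerate d 0).foldl gstep ([], [], false, 0)) := by
  unfold get_empty_space_list gfin
  rw [PySem.List.enumerate_eq_map_pyRange (d := 0), List.foldl_map]
  rfl

theorem fold_nonneg (r : List Int) : ∀ (s : Int) (pos siz : List Int) (gs : Int),
    (∀ y ∈ r, ¬ y = -1) →
    (PySem.List.enumerate r s).foldl gstep (pos, siz, false, gs) = (pos, siz, false, gs) := by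
  induction r with
  | nil => intro s pos siz gs _; simp [PySem.List.enumerate_nil]
  | cons y ys ih =>
      intro s pos siz gs h
      rw [PySem.List.enumerate_cons]
      simp only [List.foldl_cons]
      have hy : ¬ y = -1 := h y (by simp)
      simp only [gstep, if_neg hy]
      exact ih (s + 1) pos siz gs (fun z hz => h z (by simp [hz]))

theorem fold_neg (r : List Int) : ∀ (s : Int) (pos siz : List Int) (gs : Int),
    (∀ y ∈ r, y = -1) →
    (PySem.List.enumerate r s).foldl gstep (pos, siz, true, gs) = (pos, siz, true, gs + r.length) := by
  induction r with
  | nil => intro s pos siz gs _; simp [PySem.List.enumerate_nil]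
  | cons y ys ih =>
      intro s pos siz gs h
      rw [PySem.List.enumerate_cons]
      simp only [List.foldl_cons]
      have hy : y = -1 := h y (by simp)
      have hstep : gstep (pos, siz, true, gs) (s, y) = (pos, siz, true, gs + 1) := by
        simp [gstep, hy]
      rw [hstep, ih (s + 1) pos siz (gs + 1) (fun z hz => h z (by simp [hz]))]
      simp only [List.length_cons]
      push_cast
      ring_nf

theorem runLen_eq_takeWhile (v : Int) (xs : List Int) :
    runLen v xs = (xs.takeWhile (fun y => y == v)).length := by
  induction xs with
  | nil => rfl
  | cons y ys ih =>
      by_cases h : y = v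
      · simp [runLen, h, ih]
      · simp [runLen, h]

theorem drop_runLen_eq_dropWhile (v : Int) (xs : List Int) :
    xs.drop (runLen v xs) = xs.dropWhile (fun y => y == v) := by
  induction xs with
  | nil => rfl
  | cons y ys ih =>
      by_cases h : y = v
      · simp [runLen, h, ih]
      · simp [runLen, h]

theorem head_dropWhile_false {α : Type} (p : α → Bool) :
    ∀ (xs : List α) (y : α) (ys : List α), xs.dropWhile p = y :: ys → p y = false := by
  intro xs
  induction xs with
  | nil => intro y ys h; simp [List.dropWhile] at h
  | cons z zs ih =>
      intro y ys h
      by_cases hz : p z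
      · rw [List.dropWhile_cons_of_pos hz] at h; exact ih y ys h
      · rw [List.dropWhile_cons_of_neg hz] at h
        cases h; simpa using hz

theorem altGo_nil (i : Int) (pos siz : List Int) : altGo [] i pos siz = (pos, siz) := by
  rw [altGo]

theorem altGo_cons (x : Int) (xs : List Int) (i : Int) (pos siz : List Int) :
    altGo (x :: xs) i pos siz =
      if x = -1 then
        altGo (xs.drop (runLen x xs)) (i + ((runLen x xs : Int) + 1))
          (pos ++ [i]) (siz ++ [(runLen x xs : Int) + 1])
      else
        altGo (xs.drop (runLen x xs)) (i + ((runLen x xs : Int) + 1)) pos siz := by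
  rw [altGo]

theorem aux : ∀ (n : Nat) (d : List Int), d.length ≤ n → ∀ (s : Int) (pos siz : List Int),
    gfin ((PySem.List.enumerate d s).foldl gstep (pos, siz, false, 0)) = altGo d s pos siz := by
  intro n
  induction n with
  | zero =>
      intro d hd s pos siz
      cases d with
      | nil => simp [PySem.List.enumerate_nil, gfin, altGo_nil]
      | cons x xs => simp at hd
  | succ m ih =>
      intro d hd s pos siz
      cases d with
      | nil => simp [PySem.List.enumerate_nil, gfin, altGo_nil]
      | cons x xs =>
          have hsplit : xs.takeWhile (fun y => y == x) ++ xs.dropWhile (fun y => y == x) = xs :=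
            List.takeWhile_append_dropWhile
          have hrunmem : ∀ y ∈ xs.takeWhile (fun y => y == x), y = x := by
            intro y hy
            have := List.mem_takeWhile_imp hy
            simpa using this
          have hk : runLen x xs = (xs.takeWhile (fun y => y == x)).length :=
            runLen_eq_takeWhile x xs
          have hdropk : xs.drop (runLen x xs) = xs.dropWhile (fun y => y == x) :=
            drop_runLen_eq_dropWhile x xs
          have hlen : (xs.takeWhile (fun y => y == x)).length
              + (xs.dropWhile (fun y => y == x)).length = xs.length := by
            have h := congrArg List.length hsplit
            simp only [List.length_append] at h
            exact h
          have hxs : xs.length ≤ m := by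
            simpa using hd
          have hrestlen : (xs.dropWhile (fun y => y == x)).length ≤ m := by omega
          have henum : PySem.List.enumerate (x :: xs) s
              = (s, x) :: (PySem.List.enumerate (xs.takeWhile (fun y => y == x)) (s + 1)
                ++ PySem.List.enumerate (xs.dropWhile (fun y => y == x))
                    (s + 1 + (xs.takeWhile (fun y => y == x)).length)) := by
            conv_lhs => rw [← hsplit, ← List.cons_append]
            rw [PySem.List.enumerate_append, PySem.List.enumerate_cons]
            simp only [List.cons_append, List.length_cons]
            have e : s + (((xs.takeWhile (fun y => y == x)).length + 1 : Nat) : Int)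
                = s + 1 + ((xs.takeWhile (fun y => y == x)).length : Int) := by
              push_cast; ring
            rw [e]
          rw [henum]
          simp only [List.foldl_cons, List.foldl_append]
          rw [altGo_cons]
          by_cases hx : x = -1
          · -- head of a gap run
            rw [if_pos hx]
            have hstep : gstep (pos, siz, false, 0) (s, x) = (pos ++ [s], siz, true, 1) := by
              simp [gstep, hx]
            rw [hstep, fold_neg _ _ _ _ _ (fun y hy => (hrunmem y hy).trans hx)]
            rw [hdropk, hk]
            cases hre : xs.dropWhile (fun y => y == x) with
            | nil =>
                simp only [PySem.List.enumerate_nil, List.foldl_nil]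
                rw [altGo_nil]
                simp only [gfin]
                norm_num
                ring
            | cons y ys =>
                have hy : ¬ y = -1 := by
                  have := head_dropWhile_false (fun y => y == x) xs y ys hre
                  simp at this
                  rw [hx] at this; exact this
                rw [PySem.List.enumerate_cons]
                simp only [List.foldl_cons]
                have hflush : gstep (pos ++ [s], siz, true,
                      (1 : Int) + (xs.takeWhile (fun y => y == x)).length)
                      (s + 1 + (xs.takeWhile (fun y => y == x)).length, y)
                    = (pos ++ [s], siz ++ [(1 : Int) + (xs.takeWhile (fun y => y == x)).length],
                      false, 0) := by
                  simp [gstep, hy]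
                rw [hflush]
                have hid : gstep (pos ++ [s],
                      siz ++ [(1 : Int) + (xs.takeWhile (fun y => y == x)).length], false, 0)
                      (s + 1 + (xs.takeWhile (fun y => y == x)).length, y)
                    = (pos ++ [s], siz ++ [(1 : Int) + (xs.takeWhile (fun y => y == x)).length],
                      false, 0) := by
                  simp [gstep, hy]
                have hIH := ih (y :: ys) (hre ▸ hrestlen)
                  (s + 1 + (xs.takeWhile (fun y => y == x)).length)
                  (pos ++ [s]) (siz ++ [(1 : Int) + (xs.takeWhile (fun y => y == x)).length])
                rw [PySem.List.enumerate_cons] at hIH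
                simp only [List.foldl_cons] at hIH
                rw [hid] at hIH
                rw [hIH]
                have e1 : s + 1 + ((xs.takeWhile (fun y => y == x)).length : Int)
                    = s + (((xs.takeWhile (fun y => y == x)).length : Int) + 1) := by ring
                have e2 : (1 : Int) + ((xs.takeWhile (fun y => y == x)).length : Int)
                    = ((xs.takeWhile (fun y => y == x)).length : Int) + 1 := by ring
                rw [e1, e2]
          · -- head of a file run
            rw [if_neg hx]
            have hstep : gstep (pos, siz, false, 0) (s, x) = (pos, siz, false, 0) := by
              simp [gstep, hx]
            rw [hstep, fold_nonneg _ _ _ _ _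
                (fun y hy => by rw [hrunmem y hy]; exact hx)]
            rw [ih (xs.dropWhile (fun y => y == x)) hrestlen
                (s + 1 + (xs.takeWhile (fun y => y == x)).length) pos siz]
            rw [hdropk, hk]
            have e1 : s + 1 + ((xs.takeWhile (fun y => y == x)).length : Int)
                = s + (((xs.takeWhile (fun y => y == x)).length : Int) + 1) := by ring
            rw [e1]

-- ===== VERDICT (by name: the statement is the Claim_ definition above) =====
theorem get_empty_space_list_spec : Claim_equal_get_empty_space_list := by
  intro d _
  unfold Spec_get_empty_space_list get_empty_space_list_alt
  rw [bridgeA d]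
  exact aux d.length d (le_refl _) 0 [] []
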